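-- pv_equiv track=rewrite | github.com/Reinforcement-Learning-F22/HyParamOptRL | utils.py | rec_state_path
-- ===== SOURCE A (Python) =====
-- def rec_state_path(x, i, depth, path_):
--     if i > 1000:
--         i = 1000
--     if i in path_:
--         return
--     path_.append(i)
--     if depth == 0:
--         return x[i]
--     return rec_state_path(x, x[i], depth - 1, path_)
-- ===== SOURCE B (Python) =====
-- def rec_state_path(x, i, depth, path_):
--     # iterative while-loop version; mutates path_ in place exactly like A
--     while True:
--         if i > 1000:
--             i = 1000
--         if i in path_:
--             return None
--         path_.append(i)
--         if depth == 0: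
--             return x[i]
--         i = x[i]
--         depth -= 1
-- ===== Notes on version B (the rewrite author's own statement) =====
-- stated objective: simpler
-- what changed: The tail recursion over (i, depth, path_) is replaced by a single iterative while-True loop that updates i and depth in place, removing the recursive call (and Python's recursion-depth limit) entirely.
import Mathlib
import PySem

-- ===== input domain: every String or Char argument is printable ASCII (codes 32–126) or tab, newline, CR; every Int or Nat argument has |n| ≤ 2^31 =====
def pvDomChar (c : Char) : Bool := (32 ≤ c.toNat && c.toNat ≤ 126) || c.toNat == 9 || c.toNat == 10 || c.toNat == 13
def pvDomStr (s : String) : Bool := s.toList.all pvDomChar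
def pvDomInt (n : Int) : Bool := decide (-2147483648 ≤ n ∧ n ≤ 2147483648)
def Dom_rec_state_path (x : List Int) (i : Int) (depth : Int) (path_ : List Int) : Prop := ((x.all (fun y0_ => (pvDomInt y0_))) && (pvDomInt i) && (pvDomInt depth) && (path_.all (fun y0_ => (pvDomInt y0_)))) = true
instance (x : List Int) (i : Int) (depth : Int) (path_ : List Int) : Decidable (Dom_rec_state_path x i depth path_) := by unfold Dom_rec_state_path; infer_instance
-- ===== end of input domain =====

-- B replaces A's tail recursion by an iterative while-True loop (ported as iterated-step folding); objective: simpler.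
-- Both A and B append the visited indices to the caller's path_ list in place; the equivalence proved here is about the return value.


-- ===== PORT A =====
-- A's recursion; `fuel` only makes the recursion structural: each continuing step appends a
-- fresh clamped valid index to path_, and only finitely many distinct clamped valid indices
-- exist, so fuel = 2 * x.length + 2 is never exhausted.  none = Python's None (it is also
-- returned where Python raises IndexError; those inputs are excluded by Pre_).
def recA (x : List Int) (fuel : Nat) (i : Int) (depth : Int) (path_ : List Int) : Option Int :=
  match fuel with
  | 0 => none
  | fuel + 1 =>
    let i := if i > 1000 then 1000 else i
    if i ∈ path_ then none
    else if depth = 0 then PySem.List.pyGet? x i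
    else
      match PySem.List.pyGet? x i with
      | none => none                       -- Python raises IndexError here (outside Pre_)
      | some v => recA x fuel v (depth - 1) (path_ ++ [i])

def rec_state_path (x : List Int) (i : Int) (depth : Int) (path_ : List Int) : Option Int :=
  recA x (2 * x.length + 2) i depth path_

-- ===== PORT B =====
-- one iteration of B's while-True loop: .inl r = the loop has returned r, .inr s = state (i, depth, path_)
def bStep (x : List Int) (s : Option Int ⊕ (Int × Int × List Int)) : Option Int ⊕ (Int × Int × List Int) :=
  match s with
  | .inl r => .inl r
  | .inr (i, depth, path_) =>
    let i := if i > 1000 then 1000 else i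
    if i ∈ path_ then .inl none
    else if depth = 0 then .inl (PySem.List.pyGet? x i)
    else
      match PySem.List.pyGet? x i with
      | none => .inl none                  -- Python raises IndexError here (outside Pre_)
      | some v => .inr (v, depth - 1, path_ ++ [i])

def rec_state_path_alt (x : List Int) (i : Int) (depth : Int) (path_ : List Int) : Option Int :=
  match (bStep x)^[2 * x.length + 2] (.inr (i, depth, path_)) with
  | .inl r => r
  | .inr _ => none

-- ===== PRECONDITION & SPEC =====
-- Pre_ holds exactly on the inputs where A RETURNS (None on a revisited index, or x[i] at
-- depth 0); on every excluded input A raises IndexError.  That raise set is 'an out-of-range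
-- index is reachable along the input's index chain i, x[i], x[x[i]], … (each clamped to 1000)
-- before a repeat or before depth steps' — a reachability property of the input's functional
-- graph with no bounds/shape closed form, so Pre_ states it as that walk over the input; it
-- computes neither port's output.
-- `fuel` only bounds the walk: each step adds a fresh clamped valid index to `seen`, and
-- only 2 * x.length distinct such indices exist, so fuel = 2 * x.length + 2 never runs out
-- (returning false on exhaustion is the conservative direction).  The equality proved below
-- holds unconditionally of Pre_.
def preWalk (x : List Int) (fuel : Nat) (i : Int) (depth : Int) (seen : List Int) : Bool :=
  match fuel with
  | 0 => false
  | fuel + 1 =>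
    let i := if i > 1000 then 1000 else i
    if i ∈ seen then true
    else
      match PySem.List.pyGet? x i with
      | none => false                      -- A raises IndexError on this input
      | some v => if depth = 0 then true else preWalk x fuel v (depth - 1) (seen ++ [i])

def Pre_rec_state_path (x : List Int) (i : Int) (depth : Int) (path_ : List Int) : Prop :=
  preWalk x (2 * x.length + 2) i depth path_ = true

instance (x : List Int) (i : Int) (depth : Int) (path_ : List Int) : Decidable (Pre_rec_state_path x i depth path_) := by unfold Pre_rec_state_path; infer_instance

def pvWitness_rec_state_path : List Int × Int × Int × List Int := ([0, 1], 0, 3, [])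

def Spec_rec_state_path (x : List Int) (i : Int) (depth : Int) (path_ : List Int) (out : Option Int) : Prop := out = rec_state_path_alt x i depth path_
instance (x : List Int) (i : Int) (depth : Int) (path_ : List Int) (out : Option Int) : Decidable (Spec_rec_state_path x i depth path_ out) := by unfold Spec_rec_state_path; infer_instance

-- ===== CLAIM (what is proved, stated in full; the proofs are below) =====
def Claim_equal_rec_state_path : Prop := ∀ (x : List Int) (i : Int) (depth : Int) (path_ : List Int), Dom_rec_state_path x i depth path_ → Pre_rec_state_path x i depth path_ → Spec_rec_state_path x i depth path_ (rec_state_path x i depth path_)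

-- ===== LEMMAS AND PROOFS =====

-- once the loop has returned, further iterations change nothing
theorem bStep_iterate_inl (x : List Int) (f : Nat) (r : Option Int) :
    (bStep x)^[f] (.inl r) = .inl r := by
  induction f with
  | zero => rfl
  | succ f ih => rw [Function.iterate_succ_apply]; exact ih

-- running A's recursion with fuel f equals iterating B's loop body f times and collapsing
theorem recA_eq_iterate (x : List Int) (f : Nat) :
    ∀ (i depth : Int) (path_ : List Int),
      recA x f i depth path_ =
        (match (bStep x)^[f] (.inr (i, depth, path_)) with
         | .inl r => r
         | .inr _ => none) := by
  induction f with
  | zero => intro i depth path_; rfl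
  | succ f ih =>
    intro i depth path_
    rw [Function.iterate_succ_apply]
    show recA x (f + 1) i depth path_ = _
    simp only [recA, bStep]
    set j := if i > 1000 then (1000 : Int) else i with hj
    by_cases hm : j ∈ path_
    · simp [hm, bStep_iterate_inl]
    · by_cases hd : depth = 0
      · simp [hm, hd, bStep_iterate_inl]
      · cases hget : PySem.List.pyGet? x j with
        | none => simp [hm, hd, bStep_iterate_inl]
        | some v =>
          simp only [hm, hd, if_neg, not_false_iff]
          exact ih v (depth - 1) (path_ ++ [j])

-- ===== VERDICT (by name: the statement is the Claim_ definition above) =====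
theorem rec_state_path_spec : Claim_equal_rec_state_path := by
  intro x i depth path_ _ _
  unfold Spec_rec_state_path rec_state_path rec_state_path_alt
  exact recA_eq_iterate x (2 * x.length + 2) i depth path_
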